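-- pv_equiv track=rewrite | github.com/m13v/social-autoposter | scripts/fazm_theme_flip/cleanup_residuals.py | _scan_template
-- ===== SOURCE A (Python) =====
-- def _scan_template(text: str, start: int) -> int:
--     n = len(text)
--     i = start + 1
--     while i < n:
--         c = text[i]
--         if c == '\\' and i + 1 < n:
--             i += 2
--         elif c == '`':
--             return i + 1
--         elif c == '$' and i + 1 < n and text[i+1] == '{':
--             i = _find_template_expr_end(text, i)
--         else:
--             i += 1
--     return n
--
-- def _find_template_expr_end(body: str, start: int) -> int:
--     assert body[start:start+2] == '${'
--     depth = 1
--     i = start + 2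
--     n = len(body)
--     while i < n and depth > 0:
--         c = body[i]
--         if c == '{':
--             depth += 1; i += 1
--         elif c == '}':
--             depth -= 1; i += 1
--         elif c == '"' or c == "'":
--             quote = c
--             i += 1
--             while i < n and body[i] != quote:
--                 if body[i] == '\\' and i + 1 < n: i += 2
--                 else: i += 1
--             i += 1
--         elif c == '`':
--             i += 1
--             while i < n and body[i] != '`':
--                 if body[i] == '\\' and i + 1 < n: i += 2
--                 elif body[i:i+2] == '${':
--                     i = _find_template_expr_end(body, i)
--                 else:
--                     i += 1
--             i += 1
--         else:
--             i += 1
--     return i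
-- ===== SOURCE B (Python) =====
-- def _scan_template(text: str, start: int) -> int:
--     n = len(text)
--     i = start + 1
--     mode = 't'          # 't' = template text, 'e' = ${...} expression, '"' or "'" = string literal
--     depth = 0           # brace depth of the current expression frame
--     stack = []          # suspended (mode, depth) frames
--     while i < n:
--         c = text[i]
--         if mode == 't':
--             if c == '\\' and i + 1 < n:
--                 i += 2
--             elif c == '`':
--                 if not stack:
--                     return i + 1
--                 mode, depth = stack.pop()
--                 i += 1
--             elif c == '$' and i + 1 < n and text[i + 1] == '{':
--                 stack.append((mode, depth))
--                 mode, depth = 'e', 1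
--                 i += 2
--             else:
--                 i += 1
--         elif mode == 'e':
--             if c == '{':
--                 depth += 1; i += 1
--             elif c == '}':
--                 depth -= 1; i += 1
--                 if depth == 0:
--                     mode, depth = stack.pop()
--             elif c == '"' or c == "'":
--                 stack.append((mode, depth))
--                 mode, depth = c, 0
--                 i += 1
--             elif c == '`':
--                 stack.append((mode, depth))
--                 mode, depth = 't', 0
--                 i += 1
--             else:
--                 i += 1
--         else:                       # inside a quoted string; mode is the quote char
--             if c == mode:
--                 mode, depth = stack.pop()
--                 i += 1
--             elif c == '\\' and i + 1 < n:
--                 i += 2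
--             else:
--                 i += 1
--     return n
-- ===== Notes on version B (the rewrite author's own statement) =====
-- stated objective: simpler
-- what changed: Replaces A's recursive helper _find_template_expr_end (with two hand-written inner while-loops and recursion for nested templates) by a single iterative loop that keeps an explicit stack of (mode, brace-depth) frames and a current mode (template / expression / quoted-string).
-- outside the precondition, e.g. on _scan_template('`a`', -2): A returns 0, B returns 0; on _scan_template('x${', -3): A raises AssertionError, B returns 3
import Mathlib
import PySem

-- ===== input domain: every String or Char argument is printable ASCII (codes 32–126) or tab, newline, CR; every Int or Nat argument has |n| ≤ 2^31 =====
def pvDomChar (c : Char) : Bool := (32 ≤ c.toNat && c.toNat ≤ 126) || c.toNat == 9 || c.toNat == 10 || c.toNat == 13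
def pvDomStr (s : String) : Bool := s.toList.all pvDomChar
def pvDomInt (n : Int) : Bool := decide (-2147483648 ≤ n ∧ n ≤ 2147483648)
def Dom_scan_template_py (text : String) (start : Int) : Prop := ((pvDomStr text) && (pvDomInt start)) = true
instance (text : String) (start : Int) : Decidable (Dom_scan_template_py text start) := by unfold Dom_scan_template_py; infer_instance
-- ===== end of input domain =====

-- B replaces A's recursive helper `_find_template_expr_end` (with two hand-written inner
-- while-loops) by ONE iterative loop over an explicit stack of (mode, brace-depth) frames;
-- objective: simpler (one loop, no recursion), same exact return value on Pre_.

-- ===== PORT A =====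
-- text[i] as the Python reads it (negative = from the end; Python raises where pyGet? is
-- none — those inputs are outside Pre_, so the ' ' default is never the char actually read).
def pyAtA (t : List Char) (i : Int) : Char := (PySem.List.pyGet? t i).getD ' '

-- inner quote-skipping while-loop of _find_template_expr_end; returns i at loop exit
def strLoopA (t : List Char) (n : Int) (q : Char) : Nat → Int → Int
  | 0, i => i
  | f+1, i =>
    if i < n ∧ pyAtA t i ≠ q then
      if pyAtA t i = '\\' ∧ i + 1 < n then strLoopA t n q f (i + 2)
      else strLoopA t n q f (i + 1)
    else i

mutual
-- the backtick inner while-loop of _find_template_expr_end; returns i at loop exit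
def btkLoopA (t : List Char) (n : Int) : Nat → Int → Int
  | 0, i => i
  | f+1, i =>
    if i < n ∧ pyAtA t i ≠ '`' then
      if pyAtA t i = '\\' ∧ i + 1 < n then btkLoopA t n f (i + 2)
      else if PySem.List.slice t (some i) (some (i + 2)) = ['$', '{'] then
        -- i = _find_template_expr_end(body, i): the helper is depth=1, i=start+2 then its loop
        btkLoopA t n f (exprLoopA t n f 1 (i + 2))
      else btkLoopA t n f (i + 1)
    else i

-- main while-loop of _find_template_expr_end (state: depth, i); returns i at loop exit
def exprLoopA (t : List Char) (n : Int) : Nat → Int → Int → Int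
  | 0, _, i => i
  | f+1, d, i =>
    if i < n ∧ d > 0 then
      if pyAtA t i = '{' then exprLoopA t n f (d + 1) (i + 1)
      else if pyAtA t i = '}' then exprLoopA t n f (d - 1) (i + 1)
      else if pyAtA t i = '"' ∨ pyAtA t i = '\'' then
        exprLoopA t n f d (strLoopA t n (pyAtA t i) f (i + 1) + 1)
      else if pyAtA t i = '`' then exprLoopA t n f d (btkLoopA t n f (i + 1) + 1)
      else exprLoopA t n f d (i + 1)
    else i
end

-- while-loop of _scan_template
def tmplLoopA (t : List Char) (n : Int) : Nat → Int → Int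
  | 0, _ => n
  | f+1, i =>
    if i < n then
      if pyAtA t i = '\\' ∧ i + 1 < n then tmplLoopA t n f (i + 2)
      else if pyAtA t i = '`' then i + 1
      else if pyAtA t i = '$' ∧ i + 1 < n ∧ pyAtA t (i + 1) = '{' then
        -- i = _find_template_expr_end(text, i)
        tmplLoopA t n f (exprLoopA t n f 1 (i + 2))
      else tmplLoopA t n f (i + 1)
    else n

def scan_template_py (text : String) (start : Int) : Int :=
  -- n = len(text); fuel = one unit per loop iteration (every iteration advances i), enough
  tmplLoopA text.toList (text.toList.length : Int)
    ((((text.toList.length : Int)) - (start + 1)).toNat + 1) (start + 1)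

-- ===== PORT B =====
inductive ScanMode
  | tmpl : ScanMode
  | expr : ScanMode
  | str : Char → ScanMode
deriving DecidableEq, Repr

-- the single while-loop of B: explicit (mode, depth) state plus a stack of suspended
-- frames; the Nat argument is fuel (one unit per iteration; every iteration advances i,
-- so the fuel chosen below is enough and the 0 case is never reached on Pre_).
def scanLoopB (t : List Char) (n : Int) : Nat → Int → ScanMode → Int → List (ScanMode × Int) → Int
  | 0, _, _, _, _ => n
  | f+1, i, .tmpl, depth, stack =>
    if i < n then
      if pyAtA t i = '\\' ∧ i + 1 < n then scanLoopB t n f (i + 2) .tmpl depth stack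
      else if pyAtA t i = '`' then
        match stack with
        | [] => i + 1
        | (m, d) :: rest => scanLoopB t n f (i + 1) m d rest
      else if pyAtA t i = '$' ∧ i + 1 < n ∧ pyAtA t (i + 1) = '{' then
        scanLoopB t n f (i + 2) .expr 1 ((.tmpl, depth) :: stack)
      else scanLoopB t n f (i + 1) .tmpl depth stack
    else n
  | f+1, i, .expr, depth, stack =>
    if i < n then
      if pyAtA t i = '{' then scanLoopB t n f (i + 1) .expr (depth + 1) stack
      else if pyAtA t i = '}' then
        if depth - 1 = 0 then
          match stack with
          | [] => n  -- unreachable: an expr frame always has a frame below it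
          | (m, d) :: rest => scanLoopB t n f (i + 1) m d rest
        else scanLoopB t n f (i + 1) .expr (depth - 1) stack
      else if pyAtA t i = '"' ∨ pyAtA t i = '\'' then
        scanLoopB t n f (i + 1) (.str (pyAtA t i)) 0 ((.expr, depth) :: stack)
      else if pyAtA t i = '`' then scanLoopB t n f (i + 1) .tmpl 0 ((.expr, depth) :: stack)
      else scanLoopB t n f (i + 1) .expr depth stack
    else n
  | f+1, i, .str q, depth, stack =>
    if i < n then
      if pyAtA t i = q then
        match stack with
        | [] => n  -- unreachable from the initial state
        | (m, d) :: rest => scanLoopB t n f (i + 1) m d rest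
      else if pyAtA t i = '\\' ∧ i + 1 < n then scanLoopB t n f (i + 2) (.str q) depth stack
      else scanLoopB t n f (i + 1) (.str q) depth stack
    else n

def scan_template_py_alt (text : String) (start : Int) : Int :=
  scanLoopB text.toList (text.toList.length : Int)
    ((((text.toList.length : Int)) - (start + 1)).toNat + 1) (start + 1) .tmpl 0 []

-- ===== PRECONDITION & SPEC =====
-- Pre_ restricts to non-negative start (the caller always passes the index of an opening
-- backtick): for negative start, Python A either raises (IndexError once it indexes below
-- -len, AssertionError when a '${' check straddles the wrap point) or returns a value that
-- depends on Python's negative-index wraparound, an artefact of A's implementation.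
def Pre_scan_template_py (text : String) (start : Int) : Prop := 0 ≤ start
instance (text : String) (start : Int) : Decidable (Pre_scan_template_py text start) := by
  unfold Pre_scan_template_py; infer_instance

def pvWitness_scan_template_py : String × Int := ("", 0)

def Spec_scan_template_py (text : String) (start : Int) (out : Int) : Prop := out = scan_template_py_alt text start
instance (text : String) (start : Int) (out : Int) : Decidable (Spec_scan_template_py text start out) := by unfold Spec_scan_template_py; infer_instance

-- ===== CLAIM (what is proved, stated in full; the proofs are below) =====
def Claim_equal_scan_template_py : Prop := ∀ (text : String) (start : Int), Dom_scan_template_py text start → Pre_scan_template_py text start → Spec_scan_template_py text start (scan_template_py text start)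

-- ===== LEMMAS AND PROOFS =====

-- proof helper: the same loop as scanLoopB, by well-founded recursion on n - i
-- (used only in the proofs; relating the two removes fuel bookkeeping from the simulation)
def scanBW (t : List Char) (n : Int) (i : Int) (mode : ScanMode) (depth : Int)
    (stack : List (ScanMode × Int)) : Int :=
  if _h : i < n then
    match mode with
    | .tmpl =>
      if pyAtA t i = '\\' ∧ i + 1 < n then scanBW t n (i + 2) .tmpl depth stack
      else if pyAtA t i = '`' then
        match stack with
        | [] => i + 1
        | (m, d) :: rest => scanBW t n (i + 1) m d rest
      else if pyAtA t i = '$' ∧ i + 1 < n ∧ pyAtA t (i + 1) = '{' then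
        scanBW t n (i + 2) .expr 1 ((.tmpl, depth) :: stack)
      else scanBW t n (i + 1) .tmpl depth stack
    | .expr =>
      if pyAtA t i = '{' then scanBW t n (i + 1) .expr (depth + 1) stack
      else if pyAtA t i = '}' then
        if depth - 1 = 0 then
          match stack with
          | [] => n
          | (m, d) :: rest => scanBW t n (i + 1) m d rest
        else scanBW t n (i + 1) .expr (depth - 1) stack
      else if pyAtA t i = '"' ∨ pyAtA t i = '\'' then
        scanBW t n (i + 1) (.str (pyAtA t i)) 0 ((.expr, depth) :: stack)
      else if pyAtA t i = '`' then scanBW t n (i + 1) .tmpl 0 ((.expr, depth) :: stack)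
      else scanBW t n (i + 1) .expr depth stack
    | .str q =>
      if pyAtA t i = q then
        match stack with
        | [] => n
        | (m, d) :: rest => scanBW t n (i + 1) m d rest
      else if pyAtA t i = '\\' ∧ i + 1 < n then scanBW t n (i + 2) (.str q) depth stack
      else scanBW t n (i + 1) (.str q) depth stack
  else n
termination_by (n - i).toNat
decreasing_by all_goals omega

-- with enough fuel, the fueled loop of the port computes scanBW
theorem scanLoopB_toW (t : List Char) (n : Int) :
    ∀ f i mode depth stack, (n - i).toNat < f →
      scanLoopB t n f i mode depth stack = scanBW t n i mode depth stack := by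
  intro f
  induction f with
  | zero => intro i mode depth stack hf; exact absurd hf (by omega)
  | succ g ih =>
    intro i mode depth stack hf
    cases mode with
    | tmpl =>
      rw [scanBW.eq_def]
      by_cases hin : i < n
      · simp only [scanLoopB, if_pos hin, dif_pos hin]
        by_cases hes : pyAtA t i = '\\' ∧ i + 1 < n
        · rw [if_pos hes, if_pos hes]; exact ih _ _ _ _ (by omega)
        · rw [if_neg hes, if_neg hes]
          by_cases hbq : pyAtA t i = '`'
          · rw [if_pos hbq, if_pos hbq]
            cases stack with
            | nil => rfl
            | cons p rest => obtain ⟨m, d⟩ := p; exact ih _ _ _ _ (by omega)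
          · rw [if_neg hbq, if_neg hbq]
            by_cases hdl : pyAtA t i = '$' ∧ i + 1 < n ∧ pyAtA t (i + 1) = '{'
            · rw [if_pos hdl, if_pos hdl]; exact ih _ _ _ _ (by omega)
            · rw [if_neg hdl, if_neg hdl]; exact ih _ _ _ _ (by omega)
      · simp only [scanLoopB, if_neg hin, dif_neg hin]
    | expr =>
      rw [scanBW.eq_def]
      by_cases hin : i < n
      · simp only [scanLoopB, if_pos hin, dif_pos hin]
        by_cases h1 : pyAtA t i = '{'
        · rw [if_pos h1, if_pos h1]; exact ih _ _ _ _ (by omega)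
        · rw [if_neg h1, if_neg h1]
          by_cases h2 : pyAtA t i = '}'
          · rw [if_pos h2, if_pos h2]
            by_cases hdd : depth - 1 = 0
            · rw [if_pos hdd, if_pos hdd]
              cases stack with
              | nil => rfl
              | cons p rest => obtain ⟨m, d⟩ := p; exact ih _ _ _ _ (by omega)
            · rw [if_neg hdd, if_neg hdd]; exact ih _ _ _ _ (by omega)
          · rw [if_neg h2, if_neg h2]
            by_cases h3 : pyAtA t i = '"' ∨ pyAtA t i = '\''
            · rw [if_pos h3, if_pos h3]; exact ih _ _ _ _ (by omega)
            · rw [if_neg h3, if_neg h3]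
              by_cases h4 : pyAtA t i = '`'
              · rw [if_pos h4, if_pos h4]; exact ih _ _ _ _ (by omega)
              · rw [if_neg h4, if_neg h4]; exact ih _ _ _ _ (by omega)
      · simp only [scanLoopB, if_neg hin, dif_neg hin]
    | str q =>
      rw [scanBW.eq_def]
      by_cases hin : i < n
      · simp only [scanLoopB, if_pos hin, dif_pos hin]
        by_cases hq : pyAtA t i = q
        · rw [if_pos hq, if_pos hq]
          cases stack with
          | nil => rfl
          | cons p rest => obtain ⟨m, d⟩ := p; exact ih _ _ _ _ (by omega)
        · rw [if_neg hq, if_neg hq]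
          by_cases hes : pyAtA t i = '\\' ∧ i + 1 < n
          · rw [if_pos hes, if_pos hes]; exact ih _ _ _ _ (by omega)
          · rw [if_neg hes, if_neg hes]; exact ih _ _ _ _ (by omega)
      · simp only [scanLoopB, if_neg hin, dif_neg hin]

-- positions at or past the end: B's loop stops and returns n
theorem scanBW_exit (t : List Char) (n i : Int) (m : ScanMode) (d : Int)
    (s : List (ScanMode × Int)) (h : n ≤ i) : scanBW t n i m d s = n := by
  rw [scanBW.eq_def]; simp [show ¬ i < n by omega]

-- the A-side loops never move the cursor backwards
theorem strLoopA_ge (t : List Char) (n : Int) (q : Char) :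
    ∀ f i, i ≤ strLoopA t n q f i := by
  intro f
  induction f with
  | zero => intro i; simp [strLoopA]
  | succ g ih =>
    intro i
    simp only [strLoopA]
    split
    · split
      · have := ih (i + 2); omega
      · have := ih (i + 1); omega
    · omega

theorem btk_expr_ge (t : List Char) (n : Int) :
    ∀ f, (∀ i, i ≤ btkLoopA t n f i) ∧ (∀ d i, i ≤ exprLoopA t n f d i) := by
  intro f
  induction f with
  | zero => exact ⟨fun i => by simp [btkLoopA], fun d i => by simp [exprLoopA]⟩
  | succ g ih =>
    refine ⟨fun i => ?_, fun d i => ?_⟩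
    · simp only [btkLoopA]
      split
      · split
        · have := ih.1 (i + 2); omega
        · split
          · have h1 := ih.2 1 (i + 2)
            have h2 := ih.1 (exprLoopA t n g 1 (i + 2)); omega
          · have := ih.1 (i + 1); omega
      · omega
    · simp only [exprLoopA]
      split
      · split
        · have := ih.2 (d + 1) (i + 1); omega
        · split
          · have := ih.2 (d - 1) (i + 1); omega
          · split
            · have h1 := strLoopA_ge t n (pyAtA t i) g (i + 1)
              have h2 := ih.2 d (strLoopA t n (pyAtA t i) g (i + 1) + 1); omega
            · split
              · have h1 := ih.1 (i + 1)
                have h2 := ih.2 d (btkLoopA t n g (i + 1) + 1); omega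
              · have := ih.2 d (i + 1); omega
      · omega

-- exhausted depth: the expression loop exits immediately
theorem exprLoopA_depth_zero (t : List Char) (n : Int) (f : Nat) (d i : Int) (hd : d ≤ 0) :
    exprLoopA t n f d i = i := by
  cases f with
  | zero => simp [exprLoopA]
  | succ g => simp only [exprLoopA]; rw [if_neg (by omega)]

theorem take_two_eq (l : List Char) :
    l.take 2 = ['$', '{'] ↔ (l[0]? = some '$' ∧ l[1]? = some '{') := by
  match l with
  | [] => simp
  | [a] => simp
  | a :: b :: l' => simp [List.take_succ_cons]

-- body[i:i+2] == '${' is the same test B makes with two indexed reads (for 0 ≤ i < n)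
theorem sliceDollar (t : List Char) (n i : Int) (hn : n = (t.length : Int))
    (h0 : 0 ≤ i) (h1 : i < n) :
    (PySem.List.slice t (some i) (some (i + 2)) = ['$', '{']) ↔
      (pyAtA t i = '$' ∧ i + 1 < n ∧ pyAtA t (i + 1) = '{') := by
  have e0 : PySem.List.pyGet? t i = t[i.toNat]? := PySem.List.pyGet?_of_nonneg t h0
  have e1 : PySem.List.pyGet? t (i + 1) = t[(i + 1).toNat]? :=
    PySem.List.pyGet?_of_nonneg t (show (0:Int) ≤ i + 1 by omega)
  have hk1 : (i + 1).toNat = i.toNat + 1 := by omega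
  rw [PySem.List.slice_toNat t h0 (by omega)]
  have hk : (i + 2).toNat - i.toNat = 2 := by omega
  rw [hk, take_two_eq]
  have hA : (t.drop i.toNat)[0]? = t[i.toNat]? := by
    simp
  have hB : (t.drop i.toNat)[1]? = t[i.toNat + 1]? := by
    simp
  rw [hA, hB]
  constructor
  · rintro ⟨ha, hb⟩
    have hlen : i.toNat + 1 < t.length := (List.getElem?_eq_some_iff.mp hb).1
    exact ⟨by simp [pyAtA, e0, ha], by omega, by simp [pyAtA, e1, hk1, hb]⟩
  · rintro ⟨ha, hb, hc⟩
    have l1 : i.toNat < t.length := by omega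
    have l2 : i.toNat + 1 < t.length := by omega
    have ha' : t[i.toNat]? = some t[i.toNat] := List.getElem?_eq_getElem l1
    have hb' : t[i.toNat + 1]? = some t[i.toNat + 1] := List.getElem?_eq_getElem l2
    rw [ha', hb']
    simp only [pyAtA, e0, e1, hk1, ha', hb', Option.getD_some] at ha hc
    simp [ha, hc]

-- the simulation: B's stack machine tracks A's nested loops, frame for frame
theorem simAll (t : List Char) (n : Int) (hn : n = (t.length : Int)) :
    ∀ f : Nat,
      (∀ q i dep m d s, 0 ≤ i → (n - i).toNat < f →
        scanBW t n i (.str q) dep ((m, d) :: s)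
          = scanBW t n (strLoopA t n q f i + 1) m d s) ∧
      (∀ i dep m d s, 0 ≤ i → (n - i).toNat < f →
        scanBW t n i .tmpl dep ((m, d) :: s)
          = scanBW t n (btkLoopA t n f i + 1) m d s) ∧
      (∀ dd i m d s, 0 ≤ i → 1 ≤ dd → (n - i).toNat < f →
        scanBW t n i .expr dd ((m, d) :: s)
          = scanBW t n (exprLoopA t n f dd i) m d s) ∧
      (∀ i dep, 0 ≤ i → (n - i).toNat < f →
        scanBW t n i .tmpl dep [] = tmplLoopA t n f i) := by
  intro f
  induction f with
  | zero =>
    exact ⟨fun _ _ _ _ _ _ _ hf => absurd hf (by omega),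
           fun _ _ _ _ _ _ hf => absurd hf (by omega),
           fun _ _ _ _ _ _ _ hf => absurd hf (by omega),
           fun _ _ _ hf => absurd hf (by omega)⟩
  | succ g ih =>
    obtain ⟨ihS, ihB, ihE, ihT⟩ := ih
    refine ⟨fun q i dep m d s h0 hf => ?_, fun i dep m d s h0 hf => ?_,
            fun dd i m d s h0 hd1 hf => ?_, fun i dep h0 hf => ?_⟩
    -- ---- str mode vs A's quote loop ----
    · by_cases hin : i < n
      · rw [scanBW.eq_def]
        simp only [dif_pos hin]
        by_cases hq : pyAtA t i = q
        · have hA : ¬ (i < n ∧ pyAtA t i ≠ q) := by simp [hq]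
          simp only [strLoopA]
          rw [if_neg hA, if_pos hq]
        · by_cases hes : pyAtA t i = '\\' ∧ i + 1 < n
          · have hA : i < n ∧ pyAtA t i ≠ q := ⟨hin, hq⟩
            simp only [strLoopA]
            rw [if_pos hA, if_pos hes, if_neg hq, if_pos hes]
            exact ihS q (i + 2) dep m d s (by omega) (by omega)
          · have hA : i < n ∧ pyAtA t i ≠ q := ⟨hin, hq⟩
            simp only [strLoopA]
            rw [if_pos hA, if_neg hes, if_neg hq, if_neg hes]
            exact ihS q (i + 1) dep m d s (by omega) (by omega)
      · have hA : ¬ (i < n ∧ pyAtA t i ≠ q) := fun hc => hin hc.1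
        rw [scanBW_exit t n i _ _ _ (by omega)]
        simp only [strLoopA]
        rw [if_neg hA, scanBW_exit t n (i + 1) _ _ _ (by omega)]
    -- ---- tmpl mode with a suspended frame vs A's backtick loop ----
    · by_cases hin : i < n
      · rw [scanBW.eq_def]
        simp only [dif_pos hin]
        by_cases hbq : pyAtA t i = '`'
        · have hA : ¬ (i < n ∧ pyAtA t i ≠ '`') := by simp [hbq]
          have hes : ¬ (pyAtA t i = '\\' ∧ i + 1 < n) := by simp [hbq]
          simp only [btkLoopA]
          rw [if_neg hA, if_neg hes, if_pos hbq]
        · have hA : i < n ∧ pyAtA t i ≠ '`' := ⟨hin, hbq⟩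
          by_cases hes : pyAtA t i = '\\' ∧ i + 1 < n
          · simp only [btkLoopA]
            rw [if_pos hA, if_pos hes, if_pos hes]
            exact ihB (i + 2) dep m d s (by omega) (by omega)
          · by_cases hdl : pyAtA t i = '$' ∧ i + 1 < n ∧ pyAtA t (i + 1) = '{'
            · have hsl : PySem.List.slice t (some i) (some (i + 2)) = ['$', '{'] :=
                (sliceDollar t n i hn h0 hin).mpr hdl
              simp only [btkLoopA]
              rw [if_pos hA, if_neg hes, if_pos hsl, if_neg hes, if_neg hbq, if_pos hdl]
              have j1 := (btk_expr_ge t n g).2 1 (i + 2)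
              rw [ihE 1 (i + 2) .tmpl dep ((m, d) :: s) (by omega) (by omega) (by omega)]
              exact ihB (exprLoopA t n g 1 (i + 2)) dep m d s (by omega) (by omega)
            · have hsl : ¬ PySem.List.slice t (some i) (some (i + 2)) = ['$', '{'] :=
                fun hs => hdl ((sliceDollar t n i hn h0 hin).mp hs)
              simp only [btkLoopA]
              rw [if_pos hA, if_neg hes, if_neg hsl, if_neg hes, if_neg hbq, if_neg hdl]
              exact ihB (i + 1) dep m d s (by omega) (by omega)
      · have hA : ¬ (i < n ∧ pyAtA t i ≠ '`') := fun hc => hin hc.1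
        rw [scanBW_exit t n i _ _ _ (by omega)]
        simp only [btkLoopA]
        rw [if_neg hA, scanBW_exit t n (i + 1) _ _ _ (by omega)]
    -- ---- expr mode vs A's expression loop ----
    · by_cases hin : i < n
      · have hA : i < n ∧ dd > 0 := ⟨hin, by omega⟩
        rw [scanBW.eq_def]
        simp only [dif_pos hin]
        by_cases h1 : pyAtA t i = '{'
        · simp only [exprLoopA]
          rw [if_pos hA, if_pos h1, if_pos h1]
          exact ihE (dd + 1) (i + 1) m d s (by omega) (by omega) (by omega)
        · by_cases h2 : pyAtA t i = '}'
          · simp only [exprLoopA]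
            rw [if_pos hA, if_neg h1, if_pos h2, if_neg h1, if_pos h2]
            by_cases hdd : dd - 1 = 0
            · rw [if_pos hdd, exprLoopA_depth_zero t n g (dd - 1) (i + 1) (by omega)]
            · rw [if_neg hdd]
              exact ihE (dd - 1) (i + 1) m d s (by omega) (by omega) (by omega)
          · by_cases h3 : pyAtA t i = '"' ∨ pyAtA t i = '\''
            · simp only [exprLoopA]
              rw [if_pos hA, if_neg h1, if_neg h2, if_pos h3, if_neg h1, if_neg h2, if_pos h3]
              have j1 := strLoopA_ge t n (pyAtA t i) g (i + 1)
              rw [ihS (pyAtA t i) (i + 1) 0 .expr dd ((m, d) :: s) (by omega) (by omega)]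
              exact ihE dd (strLoopA t n (pyAtA t i) g (i + 1) + 1) m d s (by omega)
                (by omega) (by omega)
            · by_cases h4 : pyAtA t i = '`'
              · simp only [exprLoopA]
                rw [if_pos hA, if_neg h1, if_neg h2, if_neg h3, if_pos h4,
                  if_neg h1, if_neg h2, if_neg h3, if_pos h4]
                have j1 := (btk_expr_ge t n g).1 (i + 1)
                rw [ihB (i + 1) 0 .expr dd ((m, d) :: s) (by omega) (by omega)]
                exact ihE dd (btkLoopA t n g (i + 1) + 1) m d s (by omega) (by omega)
                  (by omega)
              · simp only [exprLoopA]
                rw [if_pos hA, if_neg h1, if_neg h2, if_neg h3, if_neg h4,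
                  if_neg h1, if_neg h2, if_neg h3, if_neg h4]
                exact ihE dd (i + 1) m d s (by omega) (by omega) (by omega)
      · have hA : ¬ (i < n ∧ dd > 0) := fun hc => hin hc.1
        rw [scanBW_exit t n i _ _ _ (by omega)]
        simp only [exprLoopA]
        rw [if_neg hA, scanBW_exit t n i _ _ _ (by omega)]
    -- ---- top-level template loop ----
    · by_cases hin : i < n
      · rw [scanBW.eq_def]
        simp only [dif_pos hin]
        by_cases hes : pyAtA t i = '\\' ∧ i + 1 < n
        · simp only [tmplLoopA]
          rw [if_pos hin, if_pos hes, if_pos hes]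
          exact ihT (i + 2) dep (by omega) (by omega)
        · by_cases hbq : pyAtA t i = '`'
          · simp only [tmplLoopA]
            rw [if_pos hin, if_neg hes, if_pos hbq, if_neg hes, if_pos hbq]
          · by_cases hdl : pyAtA t i = '$' ∧ i + 1 < n ∧ pyAtA t (i + 1) = '{'
            · simp only [tmplLoopA]
              rw [if_pos hin, if_neg hes, if_neg hbq, if_pos hdl,
                if_neg hes, if_neg hbq, if_pos hdl]
              have j1 := (btk_expr_ge t n g).2 1 (i + 2)
              rw [ihE 1 (i + 2) .tmpl dep [] (by omega) (by omega) (by omega)]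
              exact ihT (exprLoopA t n g 1 (i + 2)) dep (by omega) (by omega)
            · simp only [tmplLoopA]
              rw [if_pos hin, if_neg hes, if_neg hbq, if_neg hdl,
                if_neg hes, if_neg hbq, if_neg hdl]
              exact ihT (i + 1) dep (by omega) (by omega)
      · rw [scanBW_exit t n i _ _ _ (by omega)]
        simp only [tmplLoopA]
        rw [if_neg hin]

-- ===== VERDICT (by name: the statement is the Claim_ definition above) =====
theorem scan_template_py_spec : Claim_equal_scan_template_py := by
  intro text start _hdom hpre
  unfold Spec_scan_template_py scan_template_py scan_template_py_alt
  rw [scanLoopB_toW text.toList (text.toList.length : Int) _ _ _ _ _ (by omega)]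
  exact ((simAll text.toList (text.toList.length : Int) rfl
    (((text.toList.length : Int) - (start + 1)).toNat + 1)).2.2.2 (start + 1) 0
    (by unfold Pre_scan_template_py at hpre; omega) (by omega)).symm
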